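-- pv_equiv track=rewrite | github.com/Saipoo/job-screening | mn/n.py | _get_matched_skills
-- ===== SOURCE A (Python) =====
-- def _get_matched_skills(jd_skills, cv_skills):
--     """Get list of matched skills between JD and CV"""
--     matched_skills = []
--
--     # Convert to lowercase
--     jd_skills_lower = [skill.lower() for skill in jd_skills]
--     cv_skills_lower = [skill.lower() for skill in cv_skills]
--
--     for jd_skill in jd_skills_lower:
--         # Direct match
--         if jd_skill in cv_skills_lower:
--             matched_skills.append(jd_skill)
--             continue
--
--         # Partial match
--         for cv_skill in cv_skills_lower:
--             if (jd_skill in cv_skill) or (cv_skill in jd_skill):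
--                 matched_skills.append(f"{jd_skill} (partial match with '{cv_skill}')")
--                 break
--
--     return matched_skills
-- ===== SOURCE B (Python) =====
-- def _get_matched_skills(jd_skills, cv_skills):
--     """Get list of matched skills between JD and CV (CV-major traversal).
--
--     Instead of scanning the CV list once per JD skill, iterate over the CV
--     skills in order, assigning each one as the partial match of every
--     not-yet-assigned, not-exactly-matched JD skill it relates to; exact
--     matches come from a prebuilt set. A final pass over the JD skills emits
--     the result in JD order. Correct because CV-order assignment with
--     first-write-wins yields exactly the earliest partially matching CV skill.
--     """
--     jd_lower = [s.lower() for s in jd_skills]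
--     cv_lower = [s.lower() for s in cv_skills]
--     exact = set(cv_lower)
--     partial = {}
--     for cv in cv_lower:
--         for jd in jd_lower:
--             if jd not in exact and jd not in partial and (jd in cv or cv in jd):
--                 partial[jd] = cv
--     out = []
--     for jd in jd_lower:
--         if jd in exact:
--             out.append(jd)
--         elif jd in partial:
--             out.append(f"{jd} (partial match with '{partial[jd]}')")
--     return out
-- ===== Notes on version B (the rewrite author's own statement) =====
-- stated objective: alternative
-- what changed: Loop nesting is inverted: instead of A's JD-major scans (per JD skill, a membership test over the CV list then a separate first-partial-match scan), B traverses the CV skills once in the outer loop, filling a first-write-wins dict of partial matches keyed by JD skill, takes exact matches from a prebuilt set, and emits the result in a final pass over the JD skills.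
import Mathlib
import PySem

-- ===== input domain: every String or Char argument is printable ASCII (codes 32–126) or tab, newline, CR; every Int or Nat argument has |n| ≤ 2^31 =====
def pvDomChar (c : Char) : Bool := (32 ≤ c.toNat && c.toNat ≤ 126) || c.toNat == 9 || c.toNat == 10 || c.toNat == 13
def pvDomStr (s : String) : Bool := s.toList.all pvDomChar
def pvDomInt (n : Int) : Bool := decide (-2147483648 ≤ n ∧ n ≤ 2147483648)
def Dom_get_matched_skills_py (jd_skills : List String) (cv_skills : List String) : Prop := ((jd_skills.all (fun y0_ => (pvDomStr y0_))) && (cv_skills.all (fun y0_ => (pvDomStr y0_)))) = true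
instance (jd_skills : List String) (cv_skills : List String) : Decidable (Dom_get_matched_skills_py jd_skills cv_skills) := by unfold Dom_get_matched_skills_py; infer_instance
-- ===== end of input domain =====

-- B inverts the loop nesting: instead of A's per-JD-skill scans of the CV list, it walks the
-- CV skills once (outer loop), filling a first-write-wins dict of partial matches, with exact
-- matches taken from a prebuilt set; a final pass over the JD skills emits the result
-- (objective: alternative traversal order, same asymptotic cost).

-- ===== PORT A =====
-- A's per-skill body: exact membership test over the whole lowered CV list; otherwise a
-- separate first-match scan for a partial (substring either way) match.
def get_matched_skills_py (jd_skills : List String) (cv_skills : List String) : List String :=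
  -- jd_skills_lower / cv_skills_lower inlined as the two maps
  (jd_skills.map PySem.Str.lower).foldl (fun matched_skills jd_skill =>
    if (cv_skills.map PySem.Str.lower).contains jd_skill then
      matched_skills ++ [jd_skill]
    else
      match (cv_skills.map PySem.Str.lower).find? (fun cv_skill =>
          PySem.Str.isIn jd_skill cv_skill || PySem.Str.isIn cv_skill jd_skill) with
      | some cv_skill =>
          matched_skills ++ [jd_skill ++ " (partial match with '" ++ cv_skill ++ "')"]
      | none => matched_skills) []

-- ===== PORT B =====
-- B's inner loop over the JD skills for one CV skill: assign cv as the partial match of every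
-- JD skill that is not exactly matched, not yet assigned, and partially matches cv.
def pvCvStep (exact : PySem.Set String) (jd_lower : List String)
    (d : PySem.Dict String String) (cv : String) : PySem.Dict String String :=
  jd_lower.foldl (fun d jd =>
    if !(PySem.Set.contains exact jd) && !(d.contains jd) &&
        (PySem.Str.isIn jd cv || PySem.Str.isIn cv jd) then
      d.insert jd cv
    else d) d

def get_matched_skills_py_alt (jd_skills : List String) (cv_skills : List String) : List String :=
  let jd_lower := jd_skills.map PySem.Str.lower
  let cv_lower := cv_skills.map PySem.Str.lower
  let exact := PySem.Set.ofList cv_lower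
  let partials := cv_lower.foldl (pvCvStep exact jd_lower) PySem.Dict.empty
  jd_lower.foldl (fun out jd =>
    if PySem.Set.contains exact jd then out ++ [jd]
    else
      match partials.get? jd with
      | some cv => out ++ [jd ++ " (partial match with '" ++ cv ++ "')"]
      | none => out) []

-- ===== PRECONDITION & SPEC =====
def Spec_get_matched_skills_py (jd_skills : List String) (cv_skills : List String) (out : List String) : Prop := out = get_matched_skills_py_alt jd_skills cv_skills
instance (jd_skills : List String) (cv_skills : List String) (out : List String) : Decidable (Spec_get_matched_skills_py jd_skills cv_skills out) := by unfold Spec_get_matched_skills_py; infer_instance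

-- ===== CLAIM (what is proved, stated in full; the proofs are below) =====
def Claim_equal_get_matched_skills_py : Prop := ∀ (jd_skills : List String) (cv_skills : List String), Dom_get_matched_skills_py jd_skills cv_skills → Spec_get_matched_skills_py jd_skills cv_skills (get_matched_skills_py jd_skills cv_skills)

-- ===== LEMMAS AND PROOFS =====

-- One CV step: it inserts cv at key j exactly when j occurs in jd_lower, is not exactly
-- matched, is unassigned, and partially matches cv; every other key is untouched.
theorem pvCvStep_get? (exact : PySem.Set String) (jdl : List String)
    (d : PySem.Dict String String) (cv j : String) :
    (pvCvStep exact jdl d cv).get? j =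
      if j ∈ jdl ∧ PySem.Set.contains exact j = false ∧ d.contains j = false ∧
          (PySem.Str.isIn j cv || PySem.Str.isIn cv j) = true then
        some cv
      else d.get? j := by
  induction jdl generalizing d with
  | nil => simp [pvCvStep]
  | cons a jdl ih =>
      rw [pvCvStep, List.foldl_cons, ← pvCvStep]
      by_cases hja : j = a
      · subst hja
        by_cases hc : (!(PySem.Set.contains exact j) && !(d.contains j) &&
            (PySem.Str.isIn j cv || PySem.Str.isIn cv j)) = true
        · rw [if_pos hc, ih]
          simp only [Bool.and_eq_true, Bool.not_eq_true'] at hc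
          rw [if_neg (by simp [PySem.Dict.contains_eq_isSome_get?,
                PySem.Dict.get?_insert_self])]
          rw [PySem.Dict.get?_insert_self]
          rw [if_pos ⟨List.mem_cons_self, hc.1.1, hc.1.2, hc.2⟩]
        · rw [if_neg hc, ih]
          have hC : ¬ (PySem.Set.contains exact j = false ∧ d.contains j = false ∧
              (PySem.Str.isIn j cv || PySem.Str.isIn cv j) = true) := by
            intro ⟨h1, h2, h3⟩
            exact hc (by rw [h1, h2, h3]; rfl)
          rw [if_neg (fun h => hC h.2), if_neg (fun h => hC h.2)]
      · -- j ≠ a: the step at a never changes anything about key j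
        by_cases hc : (!(PySem.Set.contains exact a) && !(d.contains a) &&
            (PySem.Str.isIn a cv || PySem.Str.isIn cv a)) = true
        · rw [if_pos hc, ih]
          have hcont : (d.insert a cv).contains j = d.contains j := by
            rw [PySem.Dict.contains_insert]
            simp [hja]
          rw [hcont, PySem.Dict.get?_insert_of_ne _ _ hja]
          simp [List.mem_cons, hja]
        · rw [if_neg hc, ih]
          simp [List.mem_cons, hja]

-- The full CV-major fold: starting from a dict not containing j, the final value at j is the
-- first CV skill partially matching j — provided j occurs in jd_lower and is not exact.
theorem pvFold_get? (exact : PySem.Set String) (jdl : List String) (cvl : List String)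
    (d : PySem.Dict String String) (j : String) (hd : d.contains j = false) :
    (cvl.foldl (pvCvStep exact jdl) d).get? j =
      if j ∈ jdl ∧ PySem.Set.contains exact j = false then
        cvl.find? (fun cv => PySem.Str.isIn j cv || PySem.Str.isIn cv j)
      else none := by
  induction cvl generalizing d with
  | nil =>
      have : d.get? j = none := by
        rw [PySem.Dict.contains_eq_isSome_get?] at hd
        exact Option.not_isSome_iff_eq_none.mp (by simp [hd])
      simp [this]
  | cons cv cvl ih =>
      rw [List.foldl_cons]
      by_cases hmain : j ∈ jdl ∧ PySem.Set.contains exact j = false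
      · by_cases hrel : (PySem.Str.isIn j cv || PySem.Str.isIn cv j) = true
        · -- j gets assigned cv here and keeps it
          have hset : (pvCvStep exact jdl d cv).get? j = some cv := by
            rw [pvCvStep_get?, if_pos ⟨hmain.1, hmain.2, hd, hrel⟩]
          have hkeep : ∀ (l : List String) (d' : PySem.Dict String String),
              d'.get? j = some cv → (l.foldl (pvCvStep exact jdl) d').get? j = some cv := by
            intro l
            induction l with
            | nil => intro d' h; simpa using h
            | cons c l ihl =>
                intro d' h
                rw [List.foldl_cons]
                apply ihl
                rw [pvCvStep_get?]
                rw [if_neg (by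
                  simp only [PySem.Dict.contains_eq_isSome_get?, h, not_and]
                  intro _ _ hfalse
                  simp at hfalse)]
                exact h
          rw [hkeep _ _ hset, if_pos hmain, List.find?_cons, hrel]
        · have hne : (pvCvStep exact jdl d cv).contains j = false := by
            rw [PySem.Dict.contains_eq_isSome_get?, pvCvStep_get?,
                if_neg (by intro h; exact hrel h.2.2.2)]
            rw [PySem.Dict.contains_eq_isSome_get?] at hd
            simpa using hd
          rw [ih _ hne, if_pos hmain, if_pos hmain, List.find?_cons]
          simp only [hrel]
      · have hne : (pvCvStep exact jdl d cv).contains j = false := by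
          rw [PySem.Dict.contains_eq_isSome_get?, pvCvStep_get?,
              if_neg (by intro h; exact hmain ⟨h.1, h.2.1⟩)]
          rw [PySem.Dict.contains_eq_isSome_get?] at hd
          simpa using hd
        rw [ih _ hne, if_neg hmain, if_neg hmain]

-- Membership in the prebuilt set is membership in the lowered CV list.
theorem pv_exact_contains (cvl : List String) (j : String) :
    PySem.Set.contains (PySem.Set.ofList cvl) j = cvl.contains j := by
  simp only [PySem.Set.contains, List.contains_eq_mem, PySem.Set.mem_ofList]

-- ===== VERDICT (by name: the statement is the Claim_ definition above) =====
theorem get_matched_skills_py_spec : Claim_equal_get_matched_skills_py := by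
  intro jd_skills cv_skills _
  unfold Spec_get_matched_skills_py get_matched_skills_py get_matched_skills_py_alt
  simp only []
  apply PySem.List.foldl_congr_mem
  intro acc jd hjd
  rw [pv_exact_contains]
  by_cases hex : (cv_skills.map PySem.Str.lower).contains jd = true
  · rw [if_pos hex, if_pos hex]
  · have hexf : (cv_skills.map PySem.Str.lower).contains jd = false := by simpa using hex
    rw [if_neg hex, if_neg hex]
    rw [pvFold_get? _ _ _ _ jd rfl]
    rw [if_pos ⟨hjd, by rw [pv_exact_contains]; exact hexf⟩]
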